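-- pv_equiv track=rewrite | github.com/EKhudoborodov/Platform-server | functional.py | select_role
-- ===== SOURCE A (Python) =====
-- def select_role(roles):
--     res = [0, 0, 0, 0]
--     for role in roles:
--         if role == 1:
--             res[0]=1
--         elif role == 2:
--             res[1]=1
--         elif role == 3:
--             res[2]=1
--         elif role == 4:
--             res[3]=1
--     return res
-- ===== SOURCE B (Python) =====
-- def select_role(roles):
--     return [1 if i in roles else 0 for i in range(1, 5)]
-- ===== Notes on version B (the rewrite author's own statement) =====
-- stated objective: simpler
-- what changed: Instead of scanning roles once and flag-dispatching into a mutable 4-slot list, B iterates over the fixed targets 1..4 and tests membership in roles, as a one-line comprehension.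
import Mathlib
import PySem

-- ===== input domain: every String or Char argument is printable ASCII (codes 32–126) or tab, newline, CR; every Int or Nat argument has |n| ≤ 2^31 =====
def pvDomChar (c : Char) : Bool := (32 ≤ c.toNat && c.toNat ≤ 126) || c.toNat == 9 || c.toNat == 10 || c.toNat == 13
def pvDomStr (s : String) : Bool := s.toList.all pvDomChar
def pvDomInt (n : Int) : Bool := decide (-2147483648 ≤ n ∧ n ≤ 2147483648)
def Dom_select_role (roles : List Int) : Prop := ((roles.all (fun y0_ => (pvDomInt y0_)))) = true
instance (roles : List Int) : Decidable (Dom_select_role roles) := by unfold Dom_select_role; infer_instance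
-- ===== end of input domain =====

-- ===== PORT A =====
-- B replaces A's single dispatch pass by four membership tests over the fixed targets 1..4 (simpler).
def select_role (roles : List Int) : List Int :=
  roles.foldl (fun res role =>
    if role = 1 then res.set 0 1
    else if role = 2 then res.set 1 1
    else if role = 3 then res.set 2 1
    else if role = 4 then res.set 3 1
    else res) [0, 0, 0, 0]

-- ===== PORT B =====
def select_role_alt (roles : List Int) : List Int :=
  (PySem.List.pyRange 1 5 1).map (fun i => if i ∈ roles then 1 else 0)

-- ===== PRECONDITION & SPEC =====
def Spec_select_role (roles : List Int) (out : List Int) : Prop := out = select_role_alt roles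
instance (roles : List Int) (out : List Int) : Decidable (Spec_select_role roles out) := by unfold Spec_select_role; infer_instance

-- ===== CLAIM (what is proved, stated in full; the proofs are below) =====
def Claim_equal_select_role : Prop := ∀ (roles : List Int), Dom_select_role roles → Spec_select_role roles (select_role roles)

-- ===== LEMMAS AND PROOFS =====

-- ===== VERDICT (by name: the statement is the Claim_ definition above) =====
lemma select_role_fold (roles : List Int) (a b c d : Int) :
    roles.foldl (fun res role =>
      if role = 1 then res.set 0 1
      else if role = 2 then res.set 1 1
      else if role = 3 then res.set 2 1
      else if role = 4 then res.set 3 1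
      else res) [a, b, c, d] =
    [if (1:Int) ∈ roles then 1 else a, if (2:Int) ∈ roles then 1 else b,
     if (3:Int) ∈ roles then 1 else c, if (4:Int) ∈ roles then 1 else d] := by
  induction roles generalizing a b c d with
  | nil => simp
  | cons r rs ih =>
    simp only [List.foldl_cons, List.mem_cons]
    by_cases h1 : r = 1 <;> by_cases h2 : r = 2 <;> by_cases h3 : r = 3 <;>
      by_cases h4 : r = 4 <;> simp_all [eq_comm] <;> (rw [← ih]; simp)

theorem select_role_spec : Claim_equal_select_role := by
  intro roles _
  unfold Spec_select_role select_role select_role_alt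
  rw [select_role_fold]
  rfl
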